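-- pv_equiv track=rewrite | github.com/densharik/playwrightautoma | proxy_converter.py | split_proxy_string
-- ===== SOURCE A (Python) =====
-- def split_proxy_string(proxy_str):
--     """
--     Функция для разбора строки прокси на отдельные компоненты.
--     """
--     parts = []
--
--     # Удаляем 'http://' или 'https://' если они есть
--     if '://' in proxy_str:
--         protocol, rest = proxy_str.split('://', 1)
--         rest = rest.strip('/')
--     else:
--         rest = proxy_str
--
--     # Разбиваем оставшуюся строку по '@'
--     segments = rest.split('@')
--
--     # Список для хранения всех частей
--     all_parts = []
--
--     for segment in segments:
--         # Разбиваем каждый сегмент по ':'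
--         subparts = segment.split(':')
--         all_parts.extend(subparts)
--
--     # Удаляем пустые строки и пробелы
--     parts = [s.strip() for s in all_parts if s.strip()]
--
--     return parts
-- ===== SOURCE B (Python) =====
-- def split_proxy_string(proxy_str):
--     """
--     Разбор строки прокси на компоненты одним проходом по символам.
--     """
--     # Удаляем 'http://' или 'https://' если они есть
--     if '://' in proxy_str:
--         protocol, rest = proxy_str.split('://', 1)
--         rest = rest.strip('/')
--     else:
--         rest = proxy_str
--
--     # Один проход: накапливаем символы токена, на разделителе сбрасываем
--     parts = []
--     cur = []
--     for ch in rest: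
--         if ch == '@' or ch == ':':
--             tok = ''.join(cur).strip()
--             if tok:
--                 parts.append(tok)
--             cur = []
--         else:
--             cur.append(ch)
--     tok = ''.join(cur).strip()
--     if tok:
--         parts.append(tok)
--     return parts
-- ===== Notes on version B (the rewrite author's own statement) =====
-- stated objective: alternative
-- what changed: A's three staged passes (split on the at-sign, split each segment on the colon extending an accumulator, then a strip-and-filter pass) are replaced by a single character-level scan that accumulates the current token and flushes it, stripped and only if non-empty, at each delimiter character and at the end.
import Mathlib
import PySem

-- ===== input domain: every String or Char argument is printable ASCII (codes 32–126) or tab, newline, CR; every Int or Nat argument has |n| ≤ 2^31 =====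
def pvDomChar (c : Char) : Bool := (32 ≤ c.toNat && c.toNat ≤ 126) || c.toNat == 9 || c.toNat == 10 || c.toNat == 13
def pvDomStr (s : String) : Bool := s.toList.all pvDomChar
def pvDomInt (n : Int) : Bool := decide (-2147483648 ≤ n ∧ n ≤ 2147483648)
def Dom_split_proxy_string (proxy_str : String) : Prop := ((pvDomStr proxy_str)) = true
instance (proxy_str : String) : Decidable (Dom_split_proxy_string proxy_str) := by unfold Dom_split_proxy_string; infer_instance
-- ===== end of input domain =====

-- B replaces A's staged passes (split on the at-sign, split each piece on the colon, then a strip-filter pass)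
-- by one character-level scan with a token accumulator (alternative decomposition; same cost).

-- ===== PORT A =====
-- literal port: protocol guard, split('@'), inner split(':') extended into an accumulator, then strip-filter
def split_proxy_string (proxy_str : String) : List String :=
  let rest :=
    if PySem.Str.isIn "://" proxy_str then
      -- sep "://" is non-empty and present, so splitMax? is `some` with exactly 2 pieces;
      -- the getD defaults are unreachable totality padding
      let parts := (PySem.Str.splitMax? proxy_str "://" 1).getD []
      PySem.Str.stripChars (parts.getD 1 "") "/"
    else proxy_str
  let segments := (PySem.Str.split? rest "@").getD []
  let all_parts := segments.foldl (fun acc seg => acc ++ (PySem.Str.split? seg ":").getD []) []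
  (all_parts.filter (fun s => !(PySem.Str.strip s == ""))).map PySem.Str.strip

-- ===== PORT B =====
-- port of Source B: same guard, then one pass over the characters with a token accumulator

-- flush: strip the accumulated token, keep it if non-empty (the repeated `tok = ...; if tok:` block)
def pvFlush (parts : List String) (cur : List Char) : List String :=
  let tok := PySem.Str.strip (String.ofList cur)
  if tok == "" then parts else parts ++ [tok]

-- the `for ch in rest` loop of Source B, as structural recursion over the characters
def pvScan (parts : List String) (cur : List Char) : List Char → List String
  | [] => pvFlush parts cur
  | c :: cs =>
      if c = '@' || c = ':' then pvScan (pvFlush parts cur) [] cs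
      else pvScan parts (cur ++ [c]) cs

def split_proxy_string_alt (proxy_str : String) : List String :=
  let rest :=
    if PySem.Str.isIn "://" proxy_str then
      let parts := (PySem.Str.splitMax? proxy_str "://" 1).getD []
      PySem.Str.stripChars (parts.getD 1 "") "/"
    else proxy_str
  pvScan [] [] rest.toList

-- ===== PRECONDITION & SPEC =====
def Spec_split_proxy_string (proxy_str : String) (out : List String) : Prop := out = split_proxy_string_alt proxy_str
instance (proxy_str : String) (out : List String) : Decidable (Spec_split_proxy_string proxy_str out) := by unfold Spec_split_proxy_string; infer_instance

-- ===== CLAIM (what is proved, stated in full; the proofs are below) =====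
def Claim_equal_split_proxy_string : Prop := ∀ (proxy_str : String), Dom_split_proxy_string proxy_str → Spec_split_proxy_string proxy_str (split_proxy_string proxy_str)

-- ===== LEMMAS AND PROOFS =====

/-- Structural single-character split, the common spine of both token lists. -/
def splitc (c : Char) : List Char → List (List Char)
  | [] => [[]]
  | x :: xs => if x = c then [] :: splitc c xs else (splitc c xs).modifyHead (x :: ·)

/-- Split on either delimiter '@' or ':' (A's flattened token list, B's scanner token list). -/
def splitc2 (s : List Char) : List (List Char) :=
  splitc ':' (s.map (fun x => if x = '@' then ':' else x))

/-- What B keeps of a raw token. -/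
def pvKeep (t : List Char) : Option String :=
  if PySem.Str.strip (String.ofList t) = "" then none
  else some (PySem.Str.strip (String.ofList t))

theorem splitc_ne_nil (c : Char) (s : List Char) : splitc c s ≠ [] := by
  induction s with
  | nil => simp [splitc]
  | cons x xs ih =>
    simp only [splitc]
    split
    · simp
    · cases h : splitc c xs with
      | nil => exact absurd h ih
      | cons h' t' => simp [List.modifyHead]

theorem splitOn_go_eq (c : Char) :
    ∀ (s : List Char) (fuel : Nat) (cur : List Char) (acc : List (List Char))
      (hf : s.length ≤ fuel),
      PySem.Chars.splitOn.go [c] fuel s cur acc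
        = acc.reverse ++ (splitc c s).modifyHead (cur.reverse ++ ·) := by
  intro s
  induction s with
  | nil =>
    intro fuel cur acc hf
    cases fuel <;> simp [PySem.Chars.splitOn.go.eq_def, splitc]
  | cons x xs ih =>
    intro fuel cur acc hf
    cases fuel with
    | zero => simp at hf
    | succ n =>
      rw [PySem.Chars.splitOn.go.eq_def]
      by_cases hx : x = c
      · have hpre : List.isPrefixOf [c] (x :: xs) = true := by
          simp [List.isPrefixOf, hx]
        simp only [hpre, if_pos, hx]
        rw [show List.drop [c].length (c :: xs) = xs by simp]
        rw [ih n [] (cur.reverse :: acc) (by simpa using hf)]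
        simp [splitc]
        cases h : splitc c xs with
        | nil => exact absurd h (splitc_ne_nil c xs)
        | cons h' t' => simp [List.modifyHead]
      · have hpre : List.isPrefixOf [c] (x :: xs) = false := by
          simp [List.isPrefixOf]
          exact fun h => (hx h.symm).elim
        simp only [hpre, Bool.false_eq_true, if_false]
        rw [ih n (x :: cur) acc (by simpa using hf)]
        simp only [splitc, hx, if_false]
        cases h : splitc c xs with
        | nil => exact absurd h (splitc_ne_nil c xs)
        | cons h' t' => simp [List.modifyHead]

theorem splitOn_eq_splitc (c : Char) (s : List Char) :
    PySem.Chars.splitOn s [c] = splitc c s := by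
  rw [PySem.Chars.splitOn, splitOn_go_eq c s (s.length + 1) [] [] (by omega)]
  cases h : splitc c s with
  | nil => exact absurd h (splitc_ne_nil c s)
  | cons h' t' => simp [List.modifyHead]

/-- Splitting on '@' then on ':' and flattening equals the two-delimiter split. -/
theorem flatMap_splitc (s : List Char) :
    (splitc '@' s).flatMap (splitc ':') = splitc2 s := by
  unfold splitc2
  induction s with
  | nil => simp [splitc]
  | cons x xs ih =>
    by_cases hx : x = '@'
    · simp only [splitc, hx, if_pos, List.map_cons, if_true, List.flatMap_cons]
      simp [splitc, ih]
    · simp only [splitc, hx, if_false, List.map_cons]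
      cases h : splitc '@' xs with
      | nil => exact absurd h (splitc_ne_nil '@' xs)
      | cons hd tl =>
        simp only [List.modifyHead, List.flatMap_cons]
        have ih' : splitc ':' hd ++ tl.flatMap (splitc ':')
            = splitc ':' (xs.map (fun x => if x = '@' then ':' else x)) := by
          rw [← ih, h, List.flatMap_cons]
        by_cases hxb : x = ':'
        · subst hxb
          simp only [splitc, ← ih']
          simp [splitc]
        · rw [if_neg hxb, ← ih']
          cases hh : splitc ':' hd with
          | nil => exact absurd hh (splitc_ne_nil ':' hd)
          | cons h0 t0 => simp [splitc, hxb, hh]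

theorem modifyHead_nil_append {α : Type} (l : List (List α)) :
    l.modifyHead (fun x => [] ++ x) = l := by
  cases l <;> simp

/-- The scanner computes the filtered stripped tokens of the two-delimiter split. -/
theorem pvScan_eq (s : List Char) :
    ∀ (parts : List String) (cur : List Char),
      pvScan parts cur s
        = parts ++ ((splitc2 s).modifyHead (cur ++ ·)).filterMap pvKeep := by
  induction s with
  | nil =>
    intro parts cur
    simp only [pvScan, splitc2, List.map_nil, splitc, List.modifyHead, List.append_nil]
    by_cases h : PySem.Str.strip (String.ofList cur) = "" <;>
      simp [pvFlush, pvKeep, h]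
  | cons c cs ih =>
    intro parts cur
    by_cases hc : c = '@' ∨ c = ':'
    · have hmap : (fun x => if x = '@' then ':' else x) c = ':' := by
        rcases hc with h | h <;> simp [h]
      have hsplit : splitc2 (c :: cs) = [] :: splitc2 cs := by
        simp [splitc2, hmap, splitc]
      have hguard : (c = '@' || c = ':') = true := by
        rcases hc with h | h <;> simp [h]
      rw [pvScan, if_pos hguard, ih (pvFlush parts cur) [], hsplit]
      rw [modifyHead_nil_append]
      simp only [List.modifyHead, List.filterMap_cons]
      by_cases h : PySem.Str.strip (String.ofList cur) = "" <;>
        simp [pvFlush, pvKeep, h]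
    · have hc1 : c ≠ '@' := fun h => hc (Or.inl h)
      have hc2 : c ≠ ':' := fun h => hc (Or.inr h)
      have hmap : (fun x => if x = '@' then ':' else x) c = c := by simp [hc1]
      have hsplit : splitc2 (c :: cs) = (splitc2 cs).modifyHead (c :: ·) := by
        simp [splitc2, hmap, splitc, hc2]
      have hguard : (c = '@' || c = ':') = false := by simp [hc1, hc2]
      rw [pvScan, if_neg (by simp [hguard]), ih parts (cur ++ [c]), hsplit]
      congr 1
      cases h : splitc2 cs with
      | nil => exact absurd (by simpa [splitc2] using h) (splitc_ne_nil ':' _)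
      | cons hd tl => simp [List.modifyHead]

/-- A's final strip-filter over the stringified tokens is B's filterMap over the raw tokens. -/
theorem filter_strip_eq_filterMap (l : List (List Char)) :
    ((l.map String.ofList).filter (fun s => !(PySem.Str.strip s == ""))).map PySem.Str.strip
      = l.filterMap pvKeep := by
  induction l with
  | nil => simp
  | cons t ts ih =>
    by_cases h : PySem.Str.strip (String.ofList t) = "" <;>
      simp [pvKeep, h, ih]

/-- A's fold of inner splits equals the stringified two-delimiter split. -/
theorem all_parts_eq (rest : String) :
    ((PySem.Str.split? rest "@").getD []).foldl
        (fun acc seg => acc ++ (PySem.Str.split? seg ":").getD []) []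
      = (splitc2 rest.toList).map String.ofList := by
  simp only [PySem.Str.split?, PySem.Chars.split?,
    show ("@" : String).toList = ['@'] from rfl, show (":" : String).toList = [':'] from rfl,
    List.isEmpty_cons, Bool.false_eq_true, if_false, Option.map_some, Option.getD_some,
    String.toList_ofList]
  rw [PySem.List.foldl_append_eq_flatMap]
  rw [List.nil_append, List.flatMap_map]
  simp only [String.toList_ofList, splitOn_eq_splitc]
  rw [← flatMap_splitc, List.map_flatMap]

-- ===== VERDICT (by name: the statement is the Claim_ definition above) =====
theorem split_proxy_string_spec : Claim_equal_split_proxy_string := by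
  intro proxy_str _
  unfold Spec_split_proxy_string split_proxy_string split_proxy_string_alt
  simp only
  rw [all_parts_eq, filter_strip_eq_filterMap, pvScan_eq, modifyHead_nil_append,
    List.nil_append]
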